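-- pv_equiv track=rewrite | github.com/hoangm960/onion-lang | src/utils.py | parse_helper
-- ===== SOURCE A (Python) =====
-- def parse_helper(tokens, depth=0):
--     output = ""
--     while tokens:
--         token = tokens.pop(0)
--
--         if token == '(':
--             # Check for empty node and skip if found
--             if tokens and tokens[0] == ')':
--                 tokens.pop(0)
--                 continue
--
--             # If next token is another opening parenthesis, process it recursively
--             # without adding a new node line
--             if tokens and tokens[0] == '(':
--                 output += parse_helper(tokens, depth)
--                 continue
--
--             node = tokens.pop(0)
--             output += " " * depth + f"{node}:\n"
--             output += parse_helper(tokens, depth + 1)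
--         elif token == ')':
--             return output
--         else:
--             output += " " * depth + \
--                 f"{token}{'' if tokens and tokens[0] == ')' else ':'}\n"
--     return output
-- ===== SOURCE B (Python) =====
-- def parse_helper(tokens, depth=0):
--     # Iterative version: explicit stack of active indentation depths instead of recursion.
--     output = ""
--     stack = [depth]
--     while tokens and stack:
--         token = tokens.pop(0)
--         d = stack[-1]
--         if token == '(':
--             if tokens and tokens[0] == ')':
--                 tokens.pop(0)
--             elif tokens and tokens[0] == '(':
--                 stack.append(d)
--             else:
--                 node = tokens.pop(0)
--                 output += " " * d + f"{node}:\n"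
--                 stack.append(d + 1)
--         elif token == ')':
--             stack.pop()
--         else:
--             output += " " * d + f"{token}{'' if tokens and tokens[0] == ')' else ':'}\n"
--     return output
-- ===== Notes on version B (the rewrite author's own statement) =====
-- stated objective: alternative
-- what changed: Replaced the recursive parser (while-loop + recursive calls that share the mutated token list) by a single non-recursive loop driven by an explicit stack of active indentation depths.
import Mathlib
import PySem

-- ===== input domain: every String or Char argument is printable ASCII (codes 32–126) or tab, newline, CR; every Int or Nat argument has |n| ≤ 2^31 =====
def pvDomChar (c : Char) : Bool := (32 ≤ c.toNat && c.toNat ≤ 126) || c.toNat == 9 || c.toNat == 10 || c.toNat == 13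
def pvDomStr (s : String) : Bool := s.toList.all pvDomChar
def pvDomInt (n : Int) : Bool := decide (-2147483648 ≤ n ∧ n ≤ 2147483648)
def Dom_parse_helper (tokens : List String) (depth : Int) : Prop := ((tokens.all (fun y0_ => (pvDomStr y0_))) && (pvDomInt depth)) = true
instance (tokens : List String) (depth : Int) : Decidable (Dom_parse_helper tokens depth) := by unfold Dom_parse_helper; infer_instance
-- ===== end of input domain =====

-- B replaces the recursion by one loop over an explicit stack of indentation depths (alternative
-- decomposition, same cost). Both versions mutate `tokens` identically via pop(0); the theorems
-- below are about the RETURN value.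

-- ===== PORT A =====
-- " " * depth  (negative depth gives "")
def pvSpaces (d : Int) : String := String.ofList (List.replicate d.toNat ' ')

-- Literal port of A's while-loop-plus-recursion: one step consumes token(s) and the while loop is
-- the trailing recursive call; returns (output, remaining tokens). The subtype bound on the
-- remaining tokens is only what justifies termination. Where Python raises IndexError
-- ('(' as the very last token) the port returns ("", []); Pre_ excludes those inputs.
def parseA (tokens : List String) (depth : Int) : String × {l : List String // l.length ≤ tokens.length} :=
  match tokens with
  | [] => ("", ⟨[], Nat.le_refl _⟩)
  | t :: rest =>
    if t = "(" then
      match rest with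
      | [] => ("", ⟨[], by simp⟩)  -- Python: IndexError (outside Pre_)
      | r0 :: rest' =>
        if r0 = ")" then
          -- empty node: skip, continue the loop
          match parseA rest' depth with
          | (o, ⟨rem, h⟩) => (o, ⟨rem, by simp; omega⟩)
        else if r0 = "(" then
          -- output += parse_helper(tokens, depth); continue
          match parseA (r0 :: rest') depth with
          | (o, ⟨rem, h⟩) =>
            match parseA rem depth with
            | (o2, ⟨rem2, h2⟩) => (o ++ o2, ⟨rem2, by simp at h ⊢; omega⟩)
        else
          -- node line, recurse at depth+1, continue the loop
          match parseA rest' (depth + 1) with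
          | (o, ⟨rem, h⟩) =>
            match parseA rem depth with
            | (o2, ⟨rem2, h2⟩) =>
              (pvSpaces depth ++ r0 ++ ":\n" ++ (o ++ o2), ⟨rem2, by simp; omega⟩)
    else if t = ")" then ("", ⟨rest, by simp⟩)
    else
      let colon := match rest with
        | r0 :: _ => if r0 = ")" then "" else ":"
        | [] => ":"
      match parseA rest depth with
      | (o, ⟨rem, h⟩) => (pvSpaces depth ++ t ++ colon ++ "\n" ++ o, ⟨rem, by simp; omega⟩)
termination_by tokens.length
decreasing_by all_goals (simp at *; try omega)

def parse_helper (tokens : List String) (depth : Int) : String := (parseA tokens depth).1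

-- ===== PORT B =====
-- Literal port of B: one loop, explicit stack of active depths; stops when tokens or stack empty.
def parseB (output : String) (tokens : List String) (stack : List Int) : String :=
  match stack, tokens with
  | [], _ => output
  | _ :: _, [] => output
  | d :: stk, t :: rest =>
    if t = "(" then
      match rest with
      | [] => output  -- Python: IndexError (outside Pre_)
      | r0 :: rest' =>
        if r0 = ")" then parseB output rest' (d :: stk)
        else if r0 = "(" then parseB output (r0 :: rest') (d :: d :: stk)
        else parseB (output ++ (pvSpaces d ++ r0 ++ ":\n")) rest' ((d + 1) :: d :: stk)
    else if t = ")" then parseB output rest stk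
    else
      let colon := match rest with
        | r0 :: _ => if r0 = ")" then "" else ":"
        | [] => ":"
      parseB (output ++ (pvSpaces d ++ t ++ colon ++ "\n")) rest (d :: stk)
termination_by tokens.length
decreasing_by all_goals simp

def parse_helper_alt (tokens : List String) (depth : Int) : String := parseB "" tokens [depth]

-- ===== PRECONDITION & SPEC =====
-- Pre_ excludes exactly the inputs on which Python A raises IndexError: the token list ends with
-- '(' and no prefix has more ')' than '(' (so the scan reaches that final '(' and pops from an
-- empty list). B raises the same IndexError there.
def Pre_parse_helper (tokens : List String) (depth : Int) : Prop :=
  ¬ (tokens.getLast? = some "(" ∧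
     ∀ i ∈ List.range (tokens.length + 1), (tokens.take i).count ")" ≤ (tokens.take i).count "(")
instance (tokens : List String) (depth : Int) : Decidable (Pre_parse_helper tokens depth) := by
  unfold Pre_parse_helper; infer_instance
def pvWitness_parse_helper : List String × Int := (["(", "add", "1", "2", ")"], 0)

def Spec_parse_helper (tokens : List String) (depth : Int) (out : String) : Prop := out = parse_helper_alt tokens depth
instance (tokens : List String) (depth : Int) (out : String) : Decidable (Spec_parse_helper tokens depth out) := by unfold Spec_parse_helper; infer_instance

-- ===== CLAIM (what is proved, stated in full; the proofs are below) =====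
def Claim_equal_parse_helper : Prop := ∀ (tokens : List String) (depth : Int), Dom_parse_helper tokens depth → Pre_parse_helper tokens depth → Spec_parse_helper tokens depth (parse_helper tokens depth)

-- ===== LEMMAS AND PROOFS =====

theorem parseB_nil_stack (out : String) (ts : List String) : parseB out ts [] = out := by
  cases ts <;> rw [parseB]

theorem parseB_nil_tokens (out : String) (stk : List Int) : parseB out [] stk = out := by
  cases stk <;> rw [parseB]

-- Running B's loop with depth d on top of the stack first consumes exactly the tokens that one
-- call of A's parser at depth d consumes, appending A's output, then continues with the rest of
-- the stack on the remaining tokens.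
theorem bridge : ∀ (n : Nat) (tokens : List String), tokens.length ≤ n →
    ∀ (out : String) (d : Int) (stk : List Int),
      parseB out tokens (d :: stk) =
        parseB (out ++ (parseA tokens d).1) (parseA tokens d).2.1 stk := by
  intro n
  induction n with
  | zero =>
    intro tokens h out d stk
    have ht : tokens = [] := List.eq_nil_of_length_eq_zero (Nat.le_zero.mp h)
    subst ht
    rw [parseA, parseB_nil_tokens, parseB_nil_tokens, String.append_empty]
  | succ n ih =>
    intro tokens h out d stk
    match tokens with
    | [] => rw [parseA, parseB_nil_tokens, parseB_nil_tokens, String.append_empty]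
    | t :: rest =>
      simp only [List.length_cons, Nat.add_le_add_iff_right] at h
      rw [parseA.eq_def, parseB.eq_def]
      by_cases ht : t = "("
      · simp only [if_pos ht]
        match rest with
        | [] => rw [parseB_nil_tokens, String.append_empty]
        | r0 :: rest' =>
          by_cases h0 : r0 = ")"
          · simp only [if_pos h0]
            rcases hp : parseA rest' d with ⟨o, rem, hrem⟩
            have := ih rest' (by simp at h; omega) out d stk
            rw [hp] at this
            exact this
          · by_cases h1 : r0 = "("
            · simp only [if_neg h0, if_pos h1]
              rcases hp : parseA (r0 :: rest') d with ⟨o, rem, hrem⟩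
              rcases hq : parseA rem d with ⟨o2, rem2, hrem2⟩
              have s1 := ih (r0 :: rest') h out d (d :: stk)
              rw [hp] at s1
              have s2 := ih rem (by simp at hrem h; omega) (out ++ o) d stk
              rw [hq] at s2
              rw [s1, s2, String.append_assoc]
            · simp only [if_neg h0, if_neg h1]
              rcases hp : parseA rest' (d + 1) with ⟨o, rem, hrem⟩
              rcases hq : parseA rem d with ⟨o2, rem2, hrem2⟩
              have s1 := ih rest' (by simp at h; omega) (out ++ (pvSpaces d ++ r0 ++ ":\n")) (d + 1) (d :: stk)
              rw [hp] at s1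
              have s2 := ih rem (by simp at hrem h; omega) (out ++ (pvSpaces d ++ r0 ++ ":\n") ++ o) d stk
              rw [hq] at s2
              rw [s1, s2]
              simp only [String.append_assoc]
      · by_cases ht2 : t = ")"
        · simp only [if_neg ht, if_pos ht2, String.append_empty]
        · simp only [if_neg ht, if_neg ht2]
          cases rest with
          | nil =>
            rw [parseA, parseB_nil_tokens, parseB_nil_tokens, String.append_empty]
          | cons r0 rest' =>
            rcases hp : parseA (r0 :: rest') d with ⟨o, rem, hrem⟩
            have s1 := ih (r0 :: rest') h (out ++ (pvSpaces d ++ t ++ (if r0 = ")" then "" else ":") ++ "\n")) d stk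
            rw [hp] at s1
            simpa [String.append_assoc] using s1

-- ===== VERDICT (by name: the statement is the Claim_ definition above) =====
theorem parse_helper_spec : Claim_equal_parse_helper := by
  intro tokens depth _ _
  unfold Spec_parse_helper parse_helper parse_helper_alt
  rw [bridge tokens.length tokens (Nat.le_refl _) "" depth []]
  rw [parseB_nil_stack]
  simp
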